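-- pv_equiv track=rewrite | github.com/miliar/Code_Jam_Webscraper | solutions_python/solutions_year15_round0_nr1/2877.py | how_many_friends
-- ===== SOURCE A (Python) =====
-- def how_many_friends(s_max, counts):
--     """
--     s_max = shyness level of most shy person in audience
--     counts = counts of how shy people are, where count[i] is the count
--       of people with shyness i
--
--
--     return the number of friends you need to bring with you
--
--     """
--     friends = 0
--     standing = 0
--
--     for s in range(len(counts)):
--         """
--         There are counts[s] people with shyness level s in the audience
--         These will stand if there are at least s people standing.
--         If there are fewer than s people standing, bring the difference
--           as friends who will stand.
--         """
--         if standing < s: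
--             diff = s - standing
--             friends = friends + diff
--             standing = standing + diff
--         standing = standing + counts[s]
--
--     return friends
-- ===== SOURCE B (Python) =====
-- def how_many_friends(s_max, counts):
--     # Prefix sums first: prefix[s] = number of people with shyness < s,
--     # then the answer is the maximum deficit s - prefix[s], floored at 0.
--     prefix = [0]
--     for c in counts:
--         prefix.append(prefix[-1] + c)
--     return max([0] + [s - prefix[s] for s in range(len(counts))])
-- ===== Notes on version B (the rewrite author's own statement) =====
-- stated objective: alternative
-- what changed: Replaces the fused friends/standing greedy accumulator with an in-loop boost branch by a two-phase decomposition: build the prefix-sum array of counts first, then return the maximum deficit s - prefix[s] over all shyness levels, floored at 0.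
import Mathlib
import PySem

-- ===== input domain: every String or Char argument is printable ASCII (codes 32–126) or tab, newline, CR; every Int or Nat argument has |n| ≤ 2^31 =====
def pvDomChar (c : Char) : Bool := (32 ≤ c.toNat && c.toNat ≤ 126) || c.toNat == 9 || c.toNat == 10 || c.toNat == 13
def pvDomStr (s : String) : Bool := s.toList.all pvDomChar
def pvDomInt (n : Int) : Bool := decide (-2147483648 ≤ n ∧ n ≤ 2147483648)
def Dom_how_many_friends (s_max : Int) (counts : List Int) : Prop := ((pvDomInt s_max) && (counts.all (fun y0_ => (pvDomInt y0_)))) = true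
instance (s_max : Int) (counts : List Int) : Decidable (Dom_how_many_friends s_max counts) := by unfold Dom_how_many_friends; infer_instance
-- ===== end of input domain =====

-- B replaces A's fused friends/standing accumulator loop by prefix sums plus a
-- separate max-of-deficits reduction (alternative decomposition, same cost).

-- ===== PORT A =====
-- for s in range(len(counts)): if standing < s: boost; standing += counts[s]
def how_many_friends (s_max : Int) (counts : List Int) : Int :=
  ((PySem.List.pyRange 0 counts.length 1).foldl
    (fun (fs : Int × Int) (s : Int) =>
      let fs' := if fs.2 < s then (fs.1 + (s - fs.2), fs.2 + (s - fs.2)) else fs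
      (fs'.1, fs'.2 + PySem.List.pyGetD counts s 0))
    ((0 : Int), (0 : Int))).1

-- ===== PORT B =====
-- prefix = [0]; for c in counts: prefix.append(prefix[-1] + c)
def bPrefixTail : List Int → Int → List Int
  | [], _ => []
  | c :: cs, last => (last + c) :: bPrefixTail cs (last + c)

def how_many_friends_alt (s_max : Int) (counts : List Int) : Int :=
  let pre : List Int := 0 :: bPrefixTail counts 0
  -- max([0] + [s - prefix[s] for s in range(len(counts))])
  ((PySem.List.pyRange 0 counts.length 1).map
    (fun s => s - PySem.List.pyGetD pre s 0)).foldl max 0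

-- ===== PRECONDITION & SPEC =====
def Spec_how_many_friends (s_max : Int) (counts : List Int) (out : Int) : Prop := out = how_many_friends_alt s_max counts
instance (s_max : Int) (counts : List Int) (out : Int) : Decidable (Spec_how_many_friends s_max counts out) := by unfold Spec_how_many_friends; infer_instance

-- ===== CLAIM (what is proved, stated in full; the proofs are below) =====
def Claim_equal_how_many_friends : Prop := ∀ (s_max : Int) (counts : List Int), Dom_how_many_friends s_max counts → Spec_how_many_friends s_max counts (how_many_friends s_max counts)

-- ===== LEMMAS AND PROOFS =====

-- pSum counts s = prefix[s] = sum of the first s counts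
def pSum (counts : List Int) (s : Nat) : Int := (counts.take s).sum

theorem length_bPrefixTail (cs : List Int) (a : Int) :
    (bPrefixTail cs a).length = cs.length := by
  induction cs generalizing a with
  | nil => rfl
  | cons c cs ih => simp [bPrefixTail, ih]

theorem bPrefixTail_getElem (cs : List Int) (a : Int) (k : Nat) (h : k < cs.length) :
    (bPrefixTail cs a)[k]'(by rw [length_bPrefixTail]; exact h)
      = a + (cs.take (k + 1)).sum := by
  induction cs generalizing a k with
  | nil => simp at h
  | cons c cs ih =>
    cases k with
    | zero => simp [bPrefixTail]
    | succ k =>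
      simp only [bPrefixTail, List.getElem_cons_succ, List.take_succ_cons, List.sum_cons]
      rw [ih (a + c) k (by simpa using h)]
      ring

theorem pre_getElem (counts : List Int) (s : Nat) (h : s ≤ counts.length) :
    (0 :: bPrefixTail counts 0)[s]'(by simp [length_bPrefixTail]; omega)
      = pSum counts s := by
  cases s with
  | zero => simp [pSum]
  | succ s =>
    simp only [List.getElem_cons_succ]
    rw [bPrefixTail_getElem counts 0 s (by omega)]
    simp [pSum]

theorem pSum_succ (counts : List Int) (n : Nat) (h : n < counts.length) :
    pSum counts (n + 1) = pSum counts n + counts[n] := by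
  rw [pSum, pSum, List.sum_take_succ _ _ h]

-- abstract max-of-deficits fold
def mDef (counts : List Int) (n : Nat) : Int :=
  (PySem.List.pyRange 0 n 1).foldl (fun m s => max m (s - pSum counts s.toNat)) 0

-- loop invariant for A: state after n steps is (mDef n, mDef n + pSum n)
theorem A_state (counts : List Int) (n : Nat) (h : n ≤ counts.length) :
    (PySem.List.pyRange 0 n 1).foldl
      (fun (fs : Int × Int) (s : Int) =>
        let fs' := if fs.2 < s then (fs.1 + (s - fs.2), fs.2 + (s - fs.2)) else fs
        (fs'.1, fs'.2 + PySem.List.pyGetD counts s 0))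
      ((0 : Int), (0 : Int))
    = (mDef counts n, mDef counts n + pSum counts n) := by
  induction n with
  | zero => simp [mDef, pSum, PySem.List.pyRange_one_eq_nil]
  | succ n ih =>
    have hn : n < counts.length := by omega
    have hsplit : PySem.List.pyRange 0 ((n : Int) + 1) 1
        = PySem.List.pyRange 0 (n : Int) 1 ++ [(n : Int)] :=
      PySem.List.pyRange_one_succ_right (by positivity)
    have hcast : ((n + 1 : Nat) : Int) = (n : Int) + 1 := by push_cast; ring
    have hget : PySem.List.pyGetD counts (n : Int) 0 = counts[n] := by
      rw [PySem.List.pyGetD_natCast]; simp [List.getD, List.getElem?_eq_getElem hn]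
    have htoNat : ((n : Int)).toNat = n := by omega
    rw [hcast, hsplit, List.foldl_append, ih (by omega)]
    have hM : mDef counts (n + 1) = max (mDef counts n) ((n : Int) - pSum counts n) := by
      unfold mDef
      rw [hcast, hsplit, List.foldl_append]
      simp [htoNat]
    simp only [List.foldl_cons, List.foldl_nil, hget]
    rw [pSum_succ counts n hn, hM]
    split_ifs with hc
    · refine Prod.ext ?_ ?_ <;> simp <;> omega
    · refine Prod.ext ?_ ?_ <;> simp <;> omega

theorem B_eq_mDef (counts : List Int) :
    how_many_friends_alt 0 counts = mDef counts counts.length := by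
  unfold how_many_friends_alt mDef
  rw [List.foldl_map]
  apply PySem.List.foldl_congr_mem
  intro m s hs
  rw [PySem.List.mem_pyRange_one] at hs
  have h1 : s.toNat ≤ counts.length := by omega
  rw [PySem.List.pyGetD_eq_getElem (0 :: bPrefixTail counts 0) 0 hs.1
    (by simp [length_bPrefixTail]; omega)]
  rw [pre_getElem counts s.toNat h1]

-- ===== VERDICT (by name: the statement is the Claim_ definition above) =====
theorem how_many_friends_spec : Claim_equal_how_many_friends := by
  intro s_max counts _
  unfold Spec_how_many_friends how_many_friends
  rw [A_state counts counts.length le_rfl]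
  show mDef counts counts.length = how_many_friends_alt s_max counts
  rw [show how_many_friends_alt s_max counts = how_many_friends_alt 0 counts from rfl,
    B_eq_mDef]
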